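-- pv_equiv track=rewrite | github.com/Bazinga9000/Game-of-Strife-and-Death | Game of Life and Darwin.py | findcreatures
-- ===== SOURCE A (Python) =====
-- def findcreatures(grid):
--
--     vitals = [0,0]
--
--     for i in grid:
--         for j in i:
--             if j == 1 or j == 4:
--                 vitals[0] += 1
--             if j == 2 or j == 4:
--                 vitals[1] += 1
--
--     return vitals
-- ===== SOURCE B (Python) =====
-- def findcreatures(grid):
--     flat = [v for row in grid for v in row]
--     return [flat.count(1) + flat.count(4), flat.count(2) + flat.count(4)]
-- ===== Notes on version B (the rewrite author's own statement) =====
-- stated objective: simpler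
-- what changed: Replaces the nested per-cell branch-and-increment loops with flattening the grid once and combining two list.count tallies arithmetically as [count(1)+count(4), count(2)+count(4)].
import Mathlib
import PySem

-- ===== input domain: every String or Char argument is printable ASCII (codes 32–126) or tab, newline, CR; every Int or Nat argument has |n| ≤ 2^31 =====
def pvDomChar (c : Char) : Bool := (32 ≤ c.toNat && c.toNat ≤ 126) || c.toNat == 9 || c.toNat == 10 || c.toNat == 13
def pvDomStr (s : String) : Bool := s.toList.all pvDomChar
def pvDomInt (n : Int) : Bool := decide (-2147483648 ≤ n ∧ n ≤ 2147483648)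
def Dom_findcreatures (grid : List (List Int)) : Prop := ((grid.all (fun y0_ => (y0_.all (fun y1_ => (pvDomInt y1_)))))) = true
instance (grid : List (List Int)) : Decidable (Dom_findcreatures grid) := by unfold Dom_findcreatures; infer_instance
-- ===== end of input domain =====

-- B flattens the grid once and combines two PySem.List.count tallies arithmetically
-- instead of A's nested per-cell branch-and-increment loops (objective: simpler).


-- ===== PORT A =====
-- vitals is the two-element list [vitals0, vitals1], carried as a pair of its cells
def findcreatures (grid : List (List Int)) : List Int :=
  let vitals : Int × Int :=
    grid.foldl (fun v i =>
      i.foldl (fun v j =>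
        let v := if j == 1 || j == 4 then (v.1 + 1, v.2) else v
        if j == 2 || j == 4 then (v.1, v.2 + 1) else v) v) (0, 0)
  [vitals.1, vitals.2]

-- ===== PORT B =====
def findcreatures_alt (grid : List (List Int)) : List Int :=
  let flat := grid.flatMap (fun row => row)
  [PySem.List.count flat 1 + PySem.List.count flat 4,
   PySem.List.count flat 2 + PySem.List.count flat 4]

-- ===== PRECONDITION & SPEC =====
def Spec_findcreatures (grid : List (List Int)) (out : List Int) : Prop := out = findcreatures_alt grid
instance (grid : List (List Int)) (out : List Int) : Decidable (Spec_findcreatures grid out) := by unfold Spec_findcreatures; infer_instance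

-- ===== CLAIM (what is proved, stated in full; the proofs are below) =====
def Claim_equal_findcreatures : Prop := ∀ (grid : List (List Int)), Dom_findcreatures grid → Spec_findcreatures grid (findcreatures grid)

-- ===== LEMMAS AND PROOFS =====

theorem findcreatures_inner (row : List Int) (v : Int × Int) :
    row.foldl (fun v j =>
        let v := if j == 1 || j == 4 then (v.1 + 1, v.2) else v
        if j == 2 || j == 4 then (v.1, v.2 + 1) else v) v
      = (v.1 + (row.count 1 : Int) + (row.count 4 : Int),
         v.2 + (row.count 2 : Int) + (row.count 4 : Int)) := by
  induction row generalizing v with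
  | nil => simp
  | cons j t ih =>
      rw [List.foldl_cons, ih]
      by_cases h1 : j = 1 <;> by_cases h2 : j = 2 <;> by_cases h4 : j = 4 <;>
        simp [h1, h2, h4, List.count_cons, Prod.ext_iff] <;> omega

theorem findcreatures_outer (grid : List (List Int)) (v : Int × Int) :
    grid.foldl (fun v i =>
      i.foldl (fun v j =>
        let v := if j == 1 || j == 4 then (v.1 + 1, v.2) else v
        if j == 2 || j == 4 then (v.1, v.2 + 1) else v) v) v
      = (v.1 + ((grid.flatMap (fun row => row)).count 1 : Int) + ((grid.flatMap (fun row => row)).count 4 : Int),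
         v.2 + ((grid.flatMap (fun row => row)).count 2 : Int) + ((grid.flatMap (fun row => row)).count 4 : Int)) := by
  induction grid generalizing v with
  | nil => simp
  | cons r t ih =>
      simp only [List.foldl_cons]
      rw [findcreatures_inner, ih]
      simp [List.flatMap_cons, List.count_append, Prod.ext_iff]
      omega

-- ===== VERDICT (by name: the statement is the Claim_ definition above) =====
theorem findcreatures_spec : Claim_equal_findcreatures := by
  intro grid _
  unfold Spec_findcreatures findcreatures findcreatures_alt
  rw [findcreatures_outer]
  simp [PySem.List.count_eq]
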